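-- pv_equiv track=rewrite | github.com/Stahash/AdventOfCode2020 | src/day_19.py | substitute_rules
-- ===== SOURCE A (Python) =====
-- from itertools import product
--
-- def substitute_rules(rules_set, substitutes):
--
--     for substitute in substitutes.keys():
--         rule_substitute = substitutes[substitute]
--
--         for rule in rules_set.keys():
--             current_rule = rules_set[rule]
--             updated_rule = list()
--
--             for sub_rule in current_rule:
--                 elements = sub_rule.split(' ')
--                 if substitute in elements:
--                     index = [i for i in range(len(elements)) if elements[i] == substitute]
--                     variants = list(product(rule_substitute, repeat=len(index)))
--
--                     for variant in variants:
--
--                         for i in range(len(index)):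
--                             elements[index[i]] = variant[i]
--
--                         modified_subrule = ' '.join(elements)
--                         updated_rule.append(modified_subrule)
--
--                 else:
--                     updated_rule.append(sub_rule)
--
--             rules_set[rule] = updated_rule
--
--     return rules_set
-- ===== SOURCE B (Python) =====
-- def _expand(sub_rule, substitute, replacement):
--     # One left-to-right pass: grow a list of partial result strings, multiplying
--     # it by the options of each token (no itertools, no index bookkeeping).
--     tokens = sub_rule.split(' ')
--     if substitute not in tokens:
--         return [sub_rule]
--     partials = ['']
--     first = True
--     for tok in tokens:
--         opts = replacement if tok == substitute else [tok]
--         sep = '' if first else ' '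
--         partials = [p + sep + o for p in partials for o in opts]
--         first = False
--     return partials
--
-- def substitute_rules(rules_set, substitutes):
--     # Mutates rules_set in place (same as A) and returns it.
--     for substitute, replacement in substitutes.items():
--         for rule, sub_rules in rules_set.items():
--             rules_set[rule] = [s for sub_rule in sub_rules
--                                for s in _expand(sub_rule, substitute, replacement)]
--     return rules_set
-- ===== Notes on version B (the rewrite author's own statement) =====
-- stated objective: alternative
-- what changed: A expands each sub-rule by collecting the positions of the substitute, enumerating itertools.product(replacement, repeat=k) and reassigning the token list in place per variant before joining; B has no itertools and no index lists: one left-to-right pass grows a list of partial result strings, multiplying it by each token's options (replacement list at a matching token, the token itself otherwise), so the combinations are built incrementally as strings.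
import Mathlib
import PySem

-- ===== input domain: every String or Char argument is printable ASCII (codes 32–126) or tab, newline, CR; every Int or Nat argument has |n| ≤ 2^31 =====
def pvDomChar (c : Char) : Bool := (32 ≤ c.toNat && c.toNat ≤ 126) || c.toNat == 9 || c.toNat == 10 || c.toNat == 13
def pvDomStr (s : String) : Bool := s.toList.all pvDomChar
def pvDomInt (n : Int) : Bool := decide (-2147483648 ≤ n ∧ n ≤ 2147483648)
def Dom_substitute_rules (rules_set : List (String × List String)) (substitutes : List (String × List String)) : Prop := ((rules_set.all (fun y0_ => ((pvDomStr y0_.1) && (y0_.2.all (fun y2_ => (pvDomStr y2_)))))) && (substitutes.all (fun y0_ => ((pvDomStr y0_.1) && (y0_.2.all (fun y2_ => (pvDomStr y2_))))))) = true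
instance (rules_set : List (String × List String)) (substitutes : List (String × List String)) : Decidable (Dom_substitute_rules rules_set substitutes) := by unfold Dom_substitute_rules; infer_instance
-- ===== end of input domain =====

-- ===== PORT A =====
-- B replaces A's expansion (positions of the substitute + itertools.product(repeat=k)
-- + per-variant in-place token reassignment + join) by one left-to-right pass that
-- grows a list of partial result strings, multiplying it by each token's options.
-- Same cost; objective: alternative. Both Pythons mutate rules_set in place and return
-- it; the ports model the dict as an association list (the return value is what is
-- proved equal).

-- ' '.join(parts): exact via PySem.Str.join
def pvJoinSp (parts : List String) : String := PySem.Str.join " " parts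

-- s.split(' '): the separator " " is nonempty, so PySem.Str.split? always returns some;
-- getD [] never takes its default (exact)
def pvSplitSp (s : String) : List String := (PySem.Str.split? s " ").getD []

-- [i for i in range(len(elements)) if elements[i] == substitute]; the indices produced by
-- range(len(elements)) are nonnegative and in range, so Nat indexing with getD is exact
def pvIdxOf (sub : String) (elements : List String) : List Nat :=
  (List.range elements.length).filter (fun i => elements.getD i "" = sub)

-- itertools.product(rs, repeat=k), lexicographic (first coordinate varies slowest)
def pvProductRepeat (rs : List String) : Nat → List (List String)
  | 0 => [[]]
  | k + 1 => rs.flatMap (fun x => (pvProductRepeat rs k).map (x :: ·))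

-- for i in range(len(index)): elements[index[i]] = variant[i]  — index and variant have
-- equal length, zipped; indices are in range, so List.set is exact
def pvAssign (e : List String) (idxv : List (Nat × String)) : List String :=
  idxv.foldl (fun e p => e.set p.1 p.2) e

-- the body of A's 'for sub_rule in current_rule' loop (elements is mutated across the
-- variants loop in Python, so the fold carries it as state)
def pvAStep (sub : String) (rs : List String) (upd : List String) (sub_rule : String) : List String :=
  let elements := pvSplitSp sub_rule
  if sub ∈ elements then
    let index := pvIdxOf sub elements
    let variants := pvProductRepeat rs index.length
    (variants.foldl (fun st v =>
        let e' := pvAssign st.1 (index.zip v)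
        (e', st.2 ++ [pvJoinSp e'])) (elements, upd)).2
  else upd ++ [sub_rule]

def substitute_rules (rules_set : List (String × List String)) (substitutes : List (String × List String)) : List (String × List String) :=
  let subs : PySem.Dict String (List String) := PySem.Dict.mk substitutes
  (subs.keys.foldl (fun (rules : PySem.Dict String (List String)) substitute =>
      let rule_substitute := subs.getD substitute []
      rules.keys.foldl (fun rules rule =>
        let current_rule := rules.getD rule []
        let updated_rule := current_rule.foldl (pvAStep substitute rule_substitute) []
        rules.insert rule updated_rule) rules)
    (PySem.Dict.mk rules_set)).items

-- ===== PORT B =====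
-- the loop body of _expand: multiply the partials by the current token's options
-- (replacement where the token is the substitute, the token itself otherwise);
-- the Bool is Python's 'first' flag choosing the separator
def pvStep (sub : String) (rep : List String) (st : List String × Bool) (tok : String) : List String × Bool :=
  let opts := if tok = sub then rep else [tok]
  let sep := if st.2 then "" else " "
  (st.1.flatMap (fun p => opts.map (fun o => p ++ sep ++ o)), false)

-- _expand(sub_rule, substitute, replacement)
def pvExpand (sub_rule : String) (sub : String) (rep : List String) : List String :=
  let tokens := pvSplitSp sub_rule
  if sub ∉ tokens then [sub_rule]
  else ((tokens.foldl (pvStep sub rep) ([""], true)).1)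

-- B iterates rules_set.items() and reassigns only the key just visited, so each round is
-- a map over the association list's values; the nested comprehension is a flatMap
def substitute_rules_alt (rules_set : List (String × List String)) (substitutes : List (String × List String)) : List (String × List String) :=
  substitutes.foldl (fun rules p =>
    rules.map (fun q => (q.1, q.2.flatMap (fun sr => pvExpand sr p.1 p.2)))) rules_set

-- ===== PRECONDITION & SPEC =====
-- Pre_ excludes association lists with duplicate keys: both arguments are Python dicts,
-- whose key lists are always duplicate-free, so such lists represent no dict input at all.
def Pre_substitute_rules (rules_set : List (String × List String)) (substitutes : List (String × List String)) : Prop :=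
  (rules_set.map Prod.fst).Nodup ∧ (substitutes.map Prod.fst).Nodup
instance (rules_set : List (String × List String)) (substitutes : List (String × List String)) : Decidable (Pre_substitute_rules rules_set substitutes) := by unfold Pre_substitute_rules; infer_instance

def pvWitness_substitute_rules : (List (String × List String)) × (List (String × List String)) :=
  ([("0", ["1 2", "a b"]), ("1", ["a"])], [("a", ["x", "y"])])

def Spec_substitute_rules (rules_set : List (String × List String)) (substitutes : List (String × List String)) (out : List (String × List String)) : Prop := out = substitute_rules_alt rules_set substitutes
instance (rules_set : List (String × List String)) (substitutes : List (String × List String)) (out : List (String × List String)) : Decidable (Spec_substitute_rules rules_set substitutes out) := by unfold Spec_substitute_rules; infer_instance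

-- ===== CLAIM (what is proved, stated in full; the proofs are below) =====
def Claim_equal_substitute_rules : Prop := ∀ (rules_set : List (String × List String)) (substitutes : List (String × List String)), Dom_substitute_rules rules_set substitutes → Pre_substitute_rules rules_set substitutes → Spec_substitute_rules rules_set substitutes (substitute_rules rules_set substitutes)

-- ===== LEMMAS AND PROOFS =====

-- product over per-token option lists (proof-side intermediate between A and B)
def pvProduct : List (List String) → List (List String)
  | [] => [[]]
  | c :: cs => c.flatMap (fun x => (pvProduct cs).map (x :: ·))

def pvProdExpand (sub : String) (rs : List String) (sub_rule : String) : List String :=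
  let tokens := pvSplitSp sub_rule
  if sub ∈ tokens then
    let choices := tokens.map (fun tok => if tok = sub then rs else [tok])
    (pvProduct choices).map pvJoinSp
  else [sub_rule]

-- replace the occurrences of sub in e, left to right, by the entries of v
def pvSubst (sub : String) (e : List String) (v : List String) : List String :=
  match e with
  | [] => []
  | t :: e => if t = sub then v.headD "" :: pvSubst sub e v.tail else t :: pvSubst sub e v

-- " ".join of a variant's tail: each further part preceded by the separator
def pvTail : List String → String
  | [] => ""
  | o :: v => " " ++ o ++ pvTail v

theorem pvJoinSp_cons (x : String) (v : List String) :
    pvJoinSp (x :: v) = x ++ pvTail v := by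
  induction v generalizing x with
  | nil => simp [pvJoinSp, PySem.Str.join, PySem.Chars.join, List.intercalate, pvTail]
  | cons y v ih =>
    have h : pvJoinSp (x :: y :: v) = x ++ (" " ++ pvJoinSp (y :: v)) := by
      rw [← String.toList_inj]
      simp [pvJoinSp, PySem.Str.join, PySem.Chars.join, List.intercalate,
        String.toList_append, String.toList_ofList]
    rw [h, ih y, pvTail, String.append_assoc]

theorem pvIdxOf_cons (sub t : String) (e : List String) :
    pvIdxOf sub (t :: e) =
      if t = sub then 0 :: (pvIdxOf sub e).map (· + 1) else (pvIdxOf sub e).map (· + 1) := by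
  unfold pvIdxOf
  simp only [List.length_cons, List.range_succ_eq_map, List.filter_cons, List.filter_map]
  by_cases h : t = sub <;>
    simp only [h, if_true, if_false, Function.comp_def, List.getD_cons_succ,
      List.getD_cons_zero, Nat.succ_eq_add_one] <;> simp

theorem pvIdxOf_length (sub : String) (e : List String) :
    (pvIdxOf sub e).length = e.count sub := by
  induction e with
  | nil => simp [pvIdxOf]
  | cons t e ih =>
    rw [pvIdxOf_cons]
    by_cases h : t = sub <;> simp [h, ih]

theorem pvAssign_shift (idx : List Nat) (v : List String) (a : String) (e : List String) :
    pvAssign (a :: e) ((idx.map (· + 1)).zip v) = a :: pvAssign e (idx.zip v) := by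
  induction idx generalizing v a e with
  | nil => simp [pvAssign]
  | cons i idx ih =>
    cases v with
    | nil => simp [pvAssign]
    | cons x v => simpa [pvAssign] using ih v a (e.set i x)

theorem pvAssign_cons (l : List String) (p : Nat × String) (ps : List (Nat × String)) :
    pvAssign l (p :: ps) = pvAssign (l.set p.1 p.2) ps := rfl

theorem pvAssign_idx (sub : String) (e v : List String)
    (h : v.length = (pvIdxOf sub e).length) :
    pvAssign e ((pvIdxOf sub e).zip v) = pvSubst sub e v := by
  induction e generalizing v with
  | nil => simp [pvIdxOf, pvAssign, pvSubst]
  | cons t e ih =>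
    rw [pvIdxOf_cons] at h ⊢
    by_cases ht : t = sub
    · subst ht
      simp only [if_true] at h ⊢
      cases v with
      | nil => simp at h
      | cons x v =>
        have h' : v.length = (pvIdxOf t e).length := by simpa using h
        rw [List.zip_cons_cons, pvAssign_cons]
        simp only [List.set_cons_zero]
        rw [pvAssign_shift, ih v h']
        simp [pvSubst]
    · simp only [if_neg ht] at h ⊢
      rw [pvAssign_shift, ih v (by simpa using h)]
      simp [pvSubst, ht]

theorem pvAssign_idx_again (sub : String) (e v1 v2 : List String)
    (h1 : v1.length = (pvIdxOf sub e).length) (h2 : v2.length = (pvIdxOf sub e).length) :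
    pvAssign (pvSubst sub e v1) ((pvIdxOf sub e).zip v2) = pvSubst sub e v2 := by
  induction e generalizing v1 v2 with
  | nil => simp [pvIdxOf, pvAssign, pvSubst]
  | cons t e ih =>
    rw [pvIdxOf_cons] at h1 h2 ⊢
    by_cases ht : t = sub
    · subst ht
      simp only [if_true] at h1 h2 ⊢
      cases v1 with
      | nil => simp at h1
      | cons x1 v1 =>
        cases v2 with
        | nil => simp at h2
        | cons x2 v2 =>
          have h1' : v1.length = (pvIdxOf t e).length := by simpa using h1
          have h2' : v2.length = (pvIdxOf t e).length := by simpa using h2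
          simp only [pvSubst, if_true, List.headD_cons, List.tail_cons]
          rw [List.zip_cons_cons, pvAssign_cons]
          simp only [List.set_cons_zero]
          rw [pvAssign_shift, ih v1 v2 h1' h2']
    · simp only [if_neg ht] at h1 h2 ⊢
      simp only [pvSubst, if_neg ht]
      rw [pvAssign_shift, ih v1 v2 (by simpa using h1) (by simpa using h2)]

theorem pvProductRepeat_length (rs : List String) (k : Nat) (v : List String)
    (h : v ∈ pvProductRepeat rs k) : v.length = k := by
  induction k generalizing v with
  | zero => simp [pvProductRepeat] at h; simp [h]
  | succ k ih =>
    simp only [pvProductRepeat, List.mem_flatMap, List.mem_map] at h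
    obtain ⟨x, -, w, hw, rfl⟩ := h
    simp [ih w hw]

theorem pvProduct_choices (sub : String) (rs : List String) (e : List String) :
    pvProduct (e.map (fun tok => if tok = sub then rs else [tok])) =
      (pvProductRepeat rs (e.count sub)).map (pvSubst sub e) := by
  induction e with
  | nil => simp [pvProduct, pvProductRepeat, pvSubst]
  | cons t e ih =>
    by_cases ht : t = sub
    · subst ht
      simp only [List.map_cons, if_true, pvProduct, ih, List.count_cons_self,
        pvProductRepeat, List.map_flatMap, List.map_map]
      refine List.flatMap_congr (fun x _ => ?_)
      refine List.map_congr_left (fun v _ => ?_)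
      simp [pvSubst]
    · simp only [List.map_cons, if_neg ht, pvProduct, ih, List.count_cons_of_ne ht,
        List.flatMap_cons, List.flatMap_nil, List.append_nil, List.map_map]
      refine List.map_congr_left (fun v _ => ?_)
      simp [pvSubst, ht]

theorem pvFold_variants (sub : String) (e : List String) (vs : List (List String)) (upd ecur : List String)
    (hc : ∀ v, v.length = (pvIdxOf sub e).length →
        pvAssign ecur ((pvIdxOf sub e).zip v) = pvSubst sub e v)
    (hl : ∀ v ∈ vs, v.length = (pvIdxOf sub e).length) :
    (vs.foldl (fun st v =>
        let e' := pvAssign st.1 ((pvIdxOf sub e).zip v)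
        (e', st.2 ++ [pvJoinSp e'])) (ecur, upd)).2 =
      upd ++ vs.map (fun v => pvJoinSp (pvSubst sub e v)) := by
  induction vs generalizing upd ecur with
  | nil => simp
  | cons v vs ih =>
    have hv := hl v (List.mem_cons_self ..)
    simp only [List.foldl_cons, List.map_cons]
    rw [hc v hv]
    rw [ih (upd ++ [pvJoinSp (pvSubst sub e v)]) (pvSubst sub e v)
      (fun w hw => pvAssign_idx_again sub e v w hv hw)
      (fun w hw => hl w (List.mem_cons_of_mem _ hw))]
    simp

theorem pvAStep_eq_prod (sub : String) (rs upd : List String) (s : String) :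
    pvAStep sub rs upd s = upd ++ pvProdExpand sub rs s := by
  unfold pvAStep pvProdExpand
  by_cases hm : sub ∈ pvSplitSp s
  · simp only [if_pos hm]
    rw [pvFold_variants sub (pvSplitSp s) _ upd (pvSplitSp s)
      (fun v hv => pvAssign_idx sub (pvSplitSp s) v hv)
      (fun v hv => pvProductRepeat_length _ _ v hv)]
    rw [pvProduct_choices, List.map_map, pvIdxOf_length]
    rfl
  · simp only [if_neg hm]

-- the DP pass over the remaining tokens, started after the first token (first = false),
-- computes the product of the remaining options appended to each partial
theorem pvFlatMap_assoc (P : List String) (f : String → List String) (g : String → List String) :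
    (P.flatMap f).flatMap g = P.flatMap (fun p => (f p).flatMap g) := by
  induction P with
  | nil => simp
  | cons a P ih => simp [ih]

theorem pvDP (sub : String) (rep : List String) (ts : List String) (P : List String) :
    (ts.foldl (pvStep sub rep) (P, false)).1 =
      P.flatMap (fun p =>
        (pvProduct (ts.map (fun tok => if tok = sub then rep else [tok]))).map
          (fun v => p ++ pvTail v)) := by
  induction ts generalizing P with
  | nil => simp [pvProduct, pvTail]
  | cons t ts ih =>
    simp only [List.foldl_cons, pvStep]
    rw [ih, pvFlatMap_assoc]
    simp only [List.map_cons, pvProduct, List.map_flatMap, List.map_map, List.flatMap_map]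
    refine List.flatMap_congr (fun p _ => ?_)
    refine List.flatMap_congr (fun x _ => ?_)
    refine List.map_congr_left (fun v _ => ?_)
    simp [pvTail, String.append_assoc]

theorem pvExpand_eq_prod (sub : String) (rs : List String) (s : String) :
    pvExpand s sub rs = pvProdExpand sub rs s := by
  unfold pvExpand pvProdExpand
  by_cases hm : sub ∈ pvSplitSp s
  · simp only [if_pos hm, if_neg (not_not_intro hm)]
    cases he : pvSplitSp s with
    | nil => rw [he] at hm; simp at hm
    | cons t ts =>
      have h1 : List.foldl (pvStep sub rs) ([""], true) (t :: ts)
          = List.foldl (pvStep sub rs) ((if t = sub then rs else [t]), false) ts := by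
        simp [pvStep]
      rw [h1, pvDP]
      simp only [List.map_cons, pvProduct, List.map_flatMap, List.map_map]
      refine List.flatMap_congr (fun x _ => ?_)
      refine List.map_congr_left (fun v _ => ?_)
      simp [pvJoinSp_cons]
  · simp only [if_pos hm, if_neg hm]

theorem pvAStep_eq (sub : String) (rs upd : List String) (s : String) :
    pvAStep sub rs upd s = upd ++ pvExpand s sub rs := by
  rw [pvAStep_eq_prod, pvExpand_eq_prod]

theorem pvFoldl_AStep (sub : String) (rs : List String) (l upd : List String) :
    l.foldl (pvAStep sub rs) upd = upd ++ l.flatMap (fun sr => pvExpand sr sub rs) := by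
  induction l generalizing upd with
  | nil => simp
  | cons x l ih => simp [pvAStep_eq, ih, List.flatMap_cons]

theorem pvDict_round (f : List String → List String) (pre post : List (String × List String))
    (h : ((pre ++ post).map Prod.fst).Nodup) :
    ((post.map Prod.fst).foldl
        (fun (acc : PySem.Dict String (List String)) k => acc.insert k (f (acc.getD k [])))
        (PySem.Dict.mk (pre.map (fun q => (q.1, f q.2)) ++ post))).items =
      (pre ++ post).map (fun q => (q.1, f q.2)) := by
  induction post generalizing pre with
  | nil => simp
  | cons p rest ih =>
    obtain ⟨k, v⟩ := p
    have hkeys : (PySem.Dict.mk (pre.map (fun q => (q.1, f q.2)) ++ (k, v) :: rest)).keys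
        = (pre ++ (k, v) :: rest).map Prod.fst := by
      simp [PySem.Dict.keys_mk]
    have hnodup : ((pre.map (fun q => (q.1, f q.2)) ++ (k, v) :: rest).map Prod.fst).Nodup := by
      have : (pre.map (fun q => (q.1, f q.2)) ++ (k, v) :: rest).map Prod.fst
          = (pre ++ (k, v) :: rest).map Prod.fst := by simp
      rw [this]; exact h
    have hget : (PySem.Dict.mk (pre.map (fun q => (q.1, f q.2)) ++ (k, v) :: rest)).getD k [] = v := by
      refine PySem.Dict.getD_of_mem_items _ ?_ ?_ []
      · simp
      · rw [hkeys]; exact h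
    have hcont : (PySem.Dict.mk (pre.map (fun q => (q.1, f q.2)) ++ (k, v) :: rest)).contains k = true := by
      rw [PySem.Dict.contains_iff_mem_keys, hkeys]; simp
    have hsplit := h
    rw [List.map_append] at hsplit
    have hknotpre : ∀ q ∈ pre, q.1 ≠ k := by
      intro q hq hqk
      have hmem1 : q.1 ∈ pre.map Prod.fst := List.mem_map_of_mem hq
      have hmem2 : q.1 ∈ ((k, v) :: rest).map Prod.fst := by
        rw [List.map_cons, hqk]; exact List.mem_cons_self ..
      exact (List.nodup_append.mp hsplit).2.2 q.1 hmem1 q.1 hmem2 rfl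
    have hknotrest : ∀ q ∈ rest, q.1 ≠ k := by
      intro q hq hqk
      have hnd2 := (List.nodup_append.mp hsplit).2.1
      rw [List.map_cons] at hnd2
      exact (List.nodup_cons.mp hnd2).1
        (by simpa [hqk] using List.mem_map_of_mem (f := Prod.fst) hq)
    have hins : ((PySem.Dict.mk (pre.map (fun q => (q.1, f q.2)) ++ (k, v) :: rest)).insert k (f v)).items
        = (pre ++ [(k, v)]).map (fun q => (q.1, f q.2)) ++ rest := by
      rw [PySem.Dict.items_insert_of_contains _ _ hcont]
      rw [List.map_append, List.map_cons]
      have h1 : (pre.map (fun q => (q.1, f q.2))).map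
          (fun p => if (p.1 == k) = true then (k, f v) else p) = pre.map (fun q => (q.1, f q.2)) := by
        rw [List.map_map]
        refine List.map_congr_left (fun q hq => ?_)
        simp [hknotpre q hq]
      have h2 : rest.map (fun p => if (p.1 == k) = true then (k, f v) else p) = rest := by
        refine (List.map_congr_left (fun q hq => ?_)).trans (List.map_id rest)
        simp [hknotrest q hq]
      rw [h1, h2]
      simp
    simp only [List.map_cons, List.foldl_cons]
    rw [hget]
    have hd : ((PySem.Dict.mk (pre.map (fun q => (q.1, f q.2)) ++ (k, v) :: rest)).insert k (f v))
        = PySem.Dict.mk ((pre ++ [(k, v)]).map (fun q => (q.1, f q.2)) ++ rest) := by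
      have he : ∀ (d : PySem.Dict String (List String)), d = PySem.Dict.mk d.items := fun d => rfl
      rw [he (((PySem.Dict.mk (pre.map (fun q => (q.1, f q.2)) ++ (k, v) :: rest)).insert k (f v))), hins]
    rw [hd, ih (pre ++ [(k, v)]) (by simpa using h)]
    simp

theorem pvOuter_keys (g : PySem.Dict String (List String) → String → List String → PySem.Dict String (List String))
    (l : List (String × List String)) (d : PySem.Dict String (List String)) (a : PySem.Dict String (List String))
    (h : ∀ p ∈ l, d.getD p.1 [] = p.2) :
    (l.map Prod.fst).foldl (fun acc k => g acc k (d.getD k [])) a =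
      l.foldl (fun acc p => g acc p.1 p.2) a := by
  induction l generalizing a with
  | nil => simp
  | cons p l ih =>
    simp only [List.map_cons, List.foldl_cons]
    rw [h p (List.mem_cons_self ..)]
    exact ih _ (fun q hq => h q (List.mem_cons_of_mem _ hq))

theorem pvFoldAll (sl : List (String × List String)) :
    ∀ (cur : List (String × List String)), (cur.map Prod.fst).Nodup →
    (sl.foldl (fun acc p =>
        acc.keys.foldl (fun rules rule =>
          rules.insert rule ((rules.getD rule []).foldl (pvAStep p.1 p.2) [])) acc)
      (PySem.Dict.mk cur)).items =
    sl.foldl (fun l p => l.map (fun q => (q.1, q.2.flatMap (fun sr => pvExpand sr p.1 p.2)))) cur := by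
  induction sl with
  | nil => intro cur h; rfl
  | cons p t ih =>
    intro cur h
    simp only [List.foldl_cons]
    have he : ∀ (d : PySem.Dict String (List String)), d = PySem.Dict.mk d.items := fun d => rfl
    have h0 := pvDict_round (fun v => v.foldl (pvAStep p.1 p.2) []) [] cur (by simpa using h)
    simp only [List.map_nil, List.nil_append] at h0
    have hmid : (PySem.Dict.mk cur).keys.foldl (fun rules rule =>
          rules.insert rule ((rules.getD rule []).foldl (pvAStep p.1 p.2) [])) (PySem.Dict.mk cur)
        = PySem.Dict.mk (cur.map (fun q => (q.1, q.2.foldl (pvAStep p.1 p.2) []))) := by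
      rw [he ((PySem.Dict.mk cur).keys.foldl (fun rules rule =>
          rules.insert rule ((rules.getD rule []).foldl (pvAStep p.1 p.2) [])) (PySem.Dict.mk cur))]
      rw [PySem.Dict.keys_mk]
      rw [show (List.map (fun x => x.1) cur) = cur.map Prod.fst from rfl, h0]
    rw [hmid]
    have hval : cur.map (fun q => (q.1, q.2.foldl (pvAStep p.1 p.2) []))
        = cur.map (fun q => (q.1, q.2.flatMap (fun sr => pvExpand sr p.1 p.2))) := by
      refine List.map_congr_left (fun q _ => ?_)
      rw [pvFoldl_AStep]
      simp
    rw [hval]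
    exact ih _ (by simpa [List.map_map, Function.comp_def] using h)

-- ===== VERDICT (by name: the statement is the Claim_ definition above) =====
theorem substitute_rules_spec : Claim_equal_substitute_rules := by
  intro rules_set substitutes hdom hpre
  unfold Spec_substitute_rules substitute_rules substitute_rules_alt
  dsimp only
  rw [PySem.Dict.keys_mk]
  rw [show (List.map (fun x => x.1) substitutes) = substitutes.map Prod.fst from rfl]
  rw [pvOuter_keys
    (fun acc k v => acc.keys.foldl (fun rules rule =>
      rules.insert rule ((rules.getD rule []).foldl (pvAStep k v) [])) acc)
    substitutes (PySem.Dict.mk substitutes) (PySem.Dict.mk rules_set)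
    (fun p hp => PySem.Dict.getD_of_mem_items _ hp
      (by rw [PySem.Dict.keys_mk]; exact hpre.2) [])]
  exact pvFoldAll substitutes rules_set hpre.1
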